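-- pv_equiv track=rewrite | github.com/charinaanggala/ITMGT24 | ANGGALA Formative 2.py | scytale_decipher
-- ===== SOURCE A (Python) =====
-- def scytale_decipher(message, shift):
--     code =""
--     rows = len(message)//shift
--     for j in range(shift):
--         for i in range(rows):
--             x = (j +(i* shift)) % len(message)
--             code += message[x]
--     return code
-- ===== SOURCE B (Python) =====
-- def scytale_decipher(message, shift):
--     rows = len(message) // shift
--     grid = [message[i*shift:(i+1)*shift] for i in range(rows)]
--     return ''.join(''.join(col) for col in zip(*grid))
-- ===== Notes on version B (the rewrite author's own statement) =====
-- stated objective: faster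
-- what changed: Replaces A's per-character strided modular indexing with += concatenation by building the row grid from whole slices and reading it column-wise with zip(*grid) joined in one pass.
import Mathlib
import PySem

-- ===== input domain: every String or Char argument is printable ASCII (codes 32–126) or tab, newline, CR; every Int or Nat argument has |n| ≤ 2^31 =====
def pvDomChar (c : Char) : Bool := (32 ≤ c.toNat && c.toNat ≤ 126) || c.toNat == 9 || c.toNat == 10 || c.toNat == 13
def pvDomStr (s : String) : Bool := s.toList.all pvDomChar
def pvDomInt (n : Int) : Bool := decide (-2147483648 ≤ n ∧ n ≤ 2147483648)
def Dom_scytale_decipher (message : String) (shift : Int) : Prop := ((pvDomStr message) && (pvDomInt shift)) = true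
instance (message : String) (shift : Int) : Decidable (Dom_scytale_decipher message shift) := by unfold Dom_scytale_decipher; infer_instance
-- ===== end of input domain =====

-- B builds the row grid from slices and reads it column-wise via a zip-transpose (faster in
-- Python by a constant factor: bulk slicing and join instead of per-character indexing and +=).

-- ===== PORT A =====
-- literal transliteration of A: rows = len//shift, double loop over range(shift) × range(rows),
-- code += message[(j + i*shift) % len(message)].  Inside Pre_ (shift ≠ 0) the index is always
-- in range and the modulus is never 0, so pyGetD's default is never used.
def scytale_decipher (message : String) (shift : Int) : String :=
  let l := message.toList
  let rows : Int := PySem.Int.floordiv (PySem.List.len l) shift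
  let code : List Char :=
    (PySem.List.pyRange 0 shift 1).foldl (fun code j =>
      (PySem.List.pyRange 0 rows 1).foldl (fun code i =>
        let x := PySem.Int.mod (j + i * shift) (PySem.List.len l)
        code ++ [PySem.List.pyGetD l x ' ']) code) []
  String.mk code

-- ===== PORT B =====
-- zip(*grid): repeatedly emit the heads of all rows while every row is nonempty (Python's
-- truncating zip, exact also on ragged input; here all rows have equal length).
def pvZipCols (g : List (List Char)) : List (List Char) :=
  if h : g = [] ∨ g.any (·.isEmpty) then []
  else (g.map (fun r => r.headD ' ')) :: pvZipCols (g.map List.tail)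
termination_by (g.headD []).length
decreasing_by
  rw [not_or] at h
  obtain ⟨hne, hall⟩ := h
  cases g with
  | nil => exact absurd rfl hne
  | cons r rest =>
    simp only [List.headD_cons]
    have hr : ¬ r.isEmpty := by
      simp only [List.any_cons] at hall
      intro hc; simp [hc] at hall
    cases r with
    | nil => simp at hr
    | cons a t => simp

-- literal transliteration of B: rows = len//shift; grid = full-width row slices; join of the
-- zip-transposed columns.
def scytale_decipher_alt (message : String) (shift : Int) : String :=
  let l := message.toList
  let rows : Int := PySem.Int.floordiv (PySem.List.len l) shift
  let grid := (PySem.List.pyRange 0 rows 1).map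
    (fun i => PySem.List.slice l (some (i * shift)) (some ((i + 1) * shift)))
  String.mk (pvZipCols grid).flatten

-- ===== PRECONDITION & SPEC =====
-- Pre_ excludes exactly shift = 0, where A raises ZeroDivisionError (len(message)//shift).
def Pre_scytale_decipher (message : String) (shift : Int) : Prop := shift ≠ 0
instance (message : String) (shift : Int) : Decidable (Pre_scytale_decipher message shift) := by
  unfold Pre_scytale_decipher; infer_instance
def pvWitness_scytale_decipher : String × Int := ("abcdef", 2)

def Spec_scytale_decipher (message : String) (shift : Int) (out : String) : Prop := out = scytale_decipher_alt message shift
instance (message : String) (shift : Int) (out : String) : Decidable (Spec_scytale_decipher message shift out) := by unfold Spec_scytale_decipher; infer_instance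

-- ===== CLAIM (what is proved, stated in full; the proofs are below) =====
def Claim_equal_scytale_decipher : Prop := ∀ (message : String) (shift : Int), Dom_scytale_decipher message shift → Pre_scytale_decipher message shift → Spec_scytale_decipher message shift (scytale_decipher message shift)

-- ===== LEMMAS AND PROOFS =====

-- zip-transpose of a nonempty grid whose rows all have length s is the list of the s columns
theorem pvZipCols_eq_cols (s : Nat) :
    ∀ (g : List (List Char)), g ≠ [] → (∀ r ∈ g, r.length = s) →
      pvZipCols g = (List.range s).map (fun j => g.map (fun r => r.getD j ' ')) := by
  induction s with
  | zero =>
    intro g hne hlen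
    cases g with
    | nil => exact absurd rfl hne
    | cons r rest =>
      have hr : r = [] := List.eq_nil_of_length_eq_zero (hlen r (by simp))
      rw [pvZipCols]
      simp [hr]
  | succ s ih =>
    intro g hne hlen
    have hnotempty : ¬ (g = [] ∨ g.any (·.isEmpty) = true) := by
      rintro (hc | hc)
      · exact hne hc
      · rw [List.any_eq_true] at hc
        obtain ⟨r, hr, hre⟩ := hc
        have := hlen r hr
        rw [List.isEmpty_iff] at hre
        subst hre
        simp at this
    rw [pvZipCols, dif_neg hnotempty]
    have htne : g.map List.tail ≠ [] := by
      intro hc; exact hne (List.map_eq_nil_iff.mp hc)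
    have htlen : ∀ r ∈ g.map List.tail, r.length = s := by
      intro r hr
      obtain ⟨r0, hr0, rfl⟩ := List.mem_map.mp hr
      have := hlen r0 hr0
      cases r0 with
      | nil => simp at this
      | cons a t => simpa using this
    rw [ih (g.map List.tail) htne htlen]
    rw [List.range_succ_eq_map]
    simp only [List.map_cons, List.map_map]
    congr 1
    · apply List.map_congr_left
      intro r hr
      have := hlen r hr
      cases r with
      | nil => simp at this
      | cons a t => simp
    · apply List.map_congr_left
      intro j _
      simp only [Function.comp]
      apply List.map_congr_left
      intro r hr
      have := hlen r hr
      cases r with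
      | nil => simp at this
      | cons a t => simp [List.getD]

-- each full-width chunk reads the original list at offset i*s + j
theorem pv_chunk_getD (l : List Char) (s i j : Nat) (hj : j < s)
    (hfit : (i + 1) * s ≤ l.length) :
    ((l.drop (i * s)).take s).getD j ' ' = l.getD (j + i * s) ' ' := by
  have hlt : j + i * s < l.length := by nlinarith
  have h1 : ((l.drop (i * s)).take s)[j]? = (l.drop (i * s))[j]? := by
    rw [List.getElem?_take]
    simp [hj]
  have h2 : (l.drop (i * s))[j]? = l[i * s + j]? := List.getElem?_drop ..
  have h3 : i * s + j = j + i * s := by ring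
  simp only [List.getD, h1, h2, h3]

-- for a negative shift A's outer range is empty and B's rows count is nonpositive
theorem pv_rows_nonpos (n : Nat) (shift : Int) (hneg : shift < 0) :
    PySem.Int.floordiv (n : Int) shift ≤ 0 := by
  by_contra hpos
  rw [not_le] at hpos
  have hsum := PySem.Int.floordiv_mul_add_mod (n : Int) shift
  have hb := PySem.Int.mod_neg_bounds (a := (n : Int)) hneg
  have : PySem.Int.floordiv (n : Int) shift * shift < 0 :=
    Int.mul_neg_of_pos_of_neg hpos hneg
  omega

-- ===== VERDICT (by name: the statement is the Claim_ definition above) =====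
theorem scytale_decipher_spec : Claim_equal_scytale_decipher := by
  intro message shift _ hpre
  unfold Spec_scytale_decipher scytale_decipher scytale_decipher_alt
  unfold Pre_scytale_decipher at hpre
  dsimp only
  set l := message.toList with hl
  rcases lt_trichotomy shift 0 with hneg | hz | hpos
  · -- shift < 0: both sides are ""
    have hrowsle : PySem.Int.floordiv (PySem.List.len l) shift ≤ 0 := by
      rw [PySem.List.len_eq]; exact pv_rows_nonpos l.length shift hneg
    rw [PySem.List.pyRange_one_eq_nil (le_of_lt hneg),
        PySem.List.pyRange_one_eq_nil hrowsle]
    simp [pvZipCols]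
  · exact absurd hz hpre
  · -- shift > 0
    obtain ⟨s, rfl⟩ : ∃ s : Nat, shift = (s : Int) :=
      ⟨shift.toNat, (Int.toNat_of_nonneg (le_of_lt hpos)).symm⟩
    have hs : 0 < s := by exact_mod_cast hpos
    set n := l.length with hn
    have hrows : PySem.Int.floordiv (PySem.List.len l) (s : Int) = ((n / s : Nat) : Int) := by
      rw [PySem.List.len_eq]; exact_mod_cast PySem.Int.floordiv_natCast n s
    set r := n / s with hr
    have hrs : r * s ≤ n := Nat.div_mul_le_self n s
    rw [hrows]
    -- A side: collapse the two folds to a flatMap over the outer range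
    have hA :
        (PySem.List.pyRange 0 (s : Int) 1).foldl (fun code j =>
            (PySem.List.pyRange 0 ((r : Nat) : Int) 1).foldl (fun code i =>
              code ++ [PySem.List.pyGetD l (PySem.Int.mod (j + i * (s : Int)) (PySem.List.len l)) ' ']) code) []
          = (List.range s).flatMap (fun j => (List.range r).map (fun i => l.getD (j + i * s) ' ')) := by
      have hinner : ∀ (code : List Char) (j : Int), 0 ≤ j → j < (s : Int) →
          (PySem.List.pyRange 0 ((r : Nat) : Int) 1).foldl (fun code i =>
              code ++ [PySem.List.pyGetD l (PySem.Int.mod (j + i * (s : Int)) (PySem.List.len l)) ' ']) code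
            = code ++ (List.range r).map (fun i => l.getD (j.toNat + i * s) ' ') := by
        intro code j hj0 hjs
        rw [PySem.List.foldl_append_singleton_eq_map]
        congr 1
        rw [PySem.List.pyRange_one 0 ((r : Nat) : Int)]
        simp only [sub_zero, Int.toNat_natCast, zero_add, List.map_map]
        apply List.map_congr_left
        intro i hi
        have hilt : i < r := List.mem_range.mp hi
        have hidx : j + (i : Int) * (s : Int) = ((j.toNat + i * s : Nat) : Int) := by
          push_cast; omega
        have hbound : j.toNat + i * s < n := by
          have h1 : j.toNat < s := by omega
          have h2 : (i + 1) * s ≤ r * s := Nat.mul_le_mul_right s (by omega)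
          nlinarith
        have hnpos : 0 < n := by
          have : 0 < (i + 1) * s := by positivity
          have h2 : (i + 1) * s ≤ r * s := Nat.mul_le_mul_right s (by omega)
          omega
        simp only [Function.comp]
        rw [hidx, PySem.List.len_eq, hl, ← hn]
        rw [show ((n : Int)) = (((n : Nat) : Int)) from rfl]
        rw [PySem.Int.mod_natCast, PySem.List.pyGetD_natCast]
        rw [Nat.mod_eq_of_lt hbound]
      rw [PySem.List.pyRange_one 0 (s : Int)]
      simp only [sub_zero, Int.toNat_natCast, zero_add]
      rw [List.foldl_map]
      have hmain :
          (List.range s).foldl (fun code (k : Nat) =>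
            (PySem.List.pyRange 0 ((r : Nat) : Int) 1).foldl (fun code i =>
              code ++ [PySem.List.pyGetD l (PySem.Int.mod ((k : Int) + i * (s : Int)) (PySem.List.len l)) ' ']) code) []
          = (List.range s).foldl (fun code (k : Nat) =>
              code ++ (List.range r).map (fun i => l.getD (k + i * s) ' ')) [] := by
        apply PySem.List.foldl_congr_mem
        intro acc k hk
        have hk' : k < s := List.mem_range.mp hk
        rw [hinner acc (k : Int) (by positivity) (by exact_mod_cast hk')]
        simp
      rw [hmain, PySem.List.foldl_append_eq_flatMap]
      simp
    rw [hA]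
    -- B side
    by_cases hr0 : r = 0
    · rw [hr0]
      rw [show ((0 : Nat) : Int) = 0 from rfl, PySem.List.pyRange_one_eq_nil (by omega)]
      simp [pvZipCols, List.flatMap_def]
    · -- grid is nonempty with all rows of length s
      have hgrid :
          (PySem.List.pyRange 0 ((r : Nat) : Int) 1).map
              (fun i => PySem.List.slice l (some (i * (s : Int))) (some ((i + 1) * (s : Int))))
            = (List.range r).map (fun i => (l.drop (i * s)).take s) := by
        rw [PySem.List.pyRange_one 0 ((r : Nat) : Int)]
        simp only [sub_zero, Int.toNat_natCast, zero_add, List.map_map]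
        apply List.map_congr_left
        intro i _
        simp only [Function.comp]
        have h1 : (i : Int) * (s : Int) = ((i * s : Nat) : Int) := by push_cast; ring
        have h2 : ((i : Int) + 1) * (s : Int) = ((i * s : Nat) : Int) + ((s : Nat) : Int) := by
          push_cast; ring
        rw [h1, h2, PySem.List.slice_natCast_add]
      rw [hgrid]
      have hne : (List.range r).map (fun i => (l.drop (i * s)).take s) ≠ [] := by
        simp [List.map_eq_nil_iff, List.range_eq_nil, hr0]
      have hlen : ∀ row ∈ (List.range r).map (fun i => (l.drop (i * s)).take s), row.length = s := by
        intro row hrow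
        obtain ⟨i, hi, rfl⟩ := List.mem_map.mp hrow
        have hilt : i < r := List.mem_range.mp hi
        have hfit : (i + 1) * s ≤ n := by
          have : (i + 1) * s ≤ r * s := Nat.mul_le_mul_right s (by omega)
          omega
        simp only [List.length_take, List.length_drop]
        have : i * s + s ≤ n := by nlinarith
        omega
      rw [pvZipCols_eq_cols s _ hne hlen]
      rw [List.flatMap_def]
      congr 1
      congr 1
      apply List.map_congr_left
      intro j hj
      have hjs : j < s := List.mem_range.mp hj
      rw [List.map_map]
      apply List.map_congr_left
      intro i hi
      have hilt : i < r := List.mem_range.mp hi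
      have hfit : (i + 1) * s ≤ n := by
        have : (i + 1) * s ≤ r * s := Nat.mul_le_mul_right s (by omega)
        omega
      simp only [Function.comp]
      exact (pv_chunk_getD l s i j hjs hfit).symm
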